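-- pv_equiv track=rewrite | github.com/BotRunner64/Teleopit | train_mimic/scripts/train.py | _filtered_argv_for_worker
-- ===== SOURCE A (Python) =====
-- from typing import Any, Sequence
--
-- def _filtered_argv_for_worker(argv: Sequence[str]) -> list[str]:
--     filtered: list[str] = []
--     skip_gpu_id_values = False
--     skip_next_value = False
--     for token in argv:
--         if skip_gpu_id_values:
--             if token.startswith("-"):
--                 skip_gpu_id_values = False
--             else:
--                 continue
--         if skip_next_value:
--             skip_next_value = False
--             continue
--
--         if token == "--gpu_ids":
--             skip_gpu_id_values = True
--             continue
--         if token.startswith("--gpu_ids="):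
--             continue
--         if token == "--master_port":
--             skip_next_value = True
--             continue
--         if token.startswith("--master_port="):
--             continue
--
--         filtered.append(token)
--     return filtered
-- ===== SOURCE B (Python) =====
-- from typing import Any, Sequence
--
-- def _filtered_argv_for_worker(argv: Sequence[str]) -> list[str]:
--     args = list(argv)
--     n = len(args)
--     out: list[str] = []
--     i = 0
--     while i < n:
--         tok = args[i]
--         if tok == "--gpu_ids":
--             i += 1
--             while i < n and not args[i].startswith("-"):
--                 i += 1
--             continue  # reprocess the stopping "-" token
--         if tok.startswith("--gpu_ids="):
--             i += 1
--             continue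
--         if tok == "--master_port":
--             i += 2
--             continue
--         if tok.startswith("--master_port="):
--             i += 1
--             continue
--         out.append(tok)
--         i += 1
--     return out
-- ===== Notes on version B (the rewrite author's own statement) =====
-- stated objective: alternative
-- what changed: Replaces A's flag-driven for loop (two skip booleans carried across iterations) with an explicit-index while loop in which each option consumes its own values on the spot: an inner index-advancing loop for --gpu_ids that leaves the stopping '-' token to be reprocessed, and i += 2 for --master_port; no skip state crosses iterations.
import Mathlib
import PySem

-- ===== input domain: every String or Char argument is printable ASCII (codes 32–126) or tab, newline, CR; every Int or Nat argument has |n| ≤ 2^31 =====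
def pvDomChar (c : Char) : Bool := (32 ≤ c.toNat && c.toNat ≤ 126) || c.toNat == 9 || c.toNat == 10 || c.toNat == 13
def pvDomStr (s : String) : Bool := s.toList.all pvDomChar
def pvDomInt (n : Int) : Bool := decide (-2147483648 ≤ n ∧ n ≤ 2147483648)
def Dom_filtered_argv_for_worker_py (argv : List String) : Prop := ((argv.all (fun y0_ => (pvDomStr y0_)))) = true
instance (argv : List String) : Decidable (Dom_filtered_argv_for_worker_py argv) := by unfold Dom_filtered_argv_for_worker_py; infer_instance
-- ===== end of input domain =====

-- B replaces A's flag-driven loop (two skip booleans carried across iterations) by an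
-- explicit-index while loop in which each option consumes its own values on the spot
-- (objective: alternative, same cost).

-- ===== PORT A =====
-- A's for-loop over argv carrying (filtered, skip_gpu_id_values, skip_next_value),
-- branches in A's order.
def pvGoA (l : List String) (filtered : List String) (skipGpu skipNext : Bool) : List String :=
  match l with
  | [] => filtered
  | token :: rest =>
    if skipGpu && !(PySem.Str.startswith token "-") then
      pvGoA rest filtered skipGpu skipNext
    else if skipNext then pvGoA rest filtered false false
    else if token = "--gpu_ids" then pvGoA rest filtered true false
    else if PySem.Str.startswith token "--gpu_ids=" then pvGoA rest filtered false false
    else if token = "--master_port" then pvGoA rest filtered false true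
    else if PySem.Str.startswith token "--master_port=" then pvGoA rest filtered false false
    else pvGoA rest (filtered ++ [token]) false false

def filtered_argv_for_worker_py (argv : List String) : List String :=
  pvGoA argv [] false false

-- ===== PORT B =====
-- Source B's inner `while i < n and not args[i].startswith("-"): i += 1`
-- (args[i] is guarded by i < n, so List.getD is exact here)
def pvSkipIdx (argv : List String) (i : Nat) : Nat :=
  if i < argv.length then
    if !(PySem.Str.startswith (argv.getD i "") "-") then pvSkipIdx argv (i + 1) else i
  else i
termination_by argv.length - i

theorem pvSkipIdx_ge (argv : List String) (i : Nat) : i ≤ pvSkipIdx argv i := by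
  unfold pvSkipIdx
  split
  · split
    · exact Nat.le_trans (Nat.le_succ i) (pvSkipIdx_ge argv (i + 1))
    · exact Nat.le_refl i
  · exact Nat.le_refl i
termination_by argv.length - i

-- Source B's outer while loop over the index i, carrying out
def pvGoB (argv : List String) (out : List String) (i : Nat) : List String :=
  if _h : i < argv.length then
    let tok := argv.getD i ""
    if tok = "--gpu_ids" then pvGoB argv out (pvSkipIdx argv (i + 1))
    else if PySem.Str.startswith tok "--gpu_ids=" then pvGoB argv out (i + 1)
    else if tok = "--master_port" then pvGoB argv out (i + 2)
    else if PySem.Str.startswith tok "--master_port=" then pvGoB argv out (i + 1)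
    else pvGoB argv (out ++ [tok]) (i + 1)
  else out
termination_by argv.length - i
decreasing_by
  · have := pvSkipIdx_ge argv (i + 1); omega
  · omega
  · omega
  · omega
  · omega

def filtered_argv_for_worker_py_alt (argv : List String) : List String :=
  pvGoB argv [] 0

-- ===== PRECONDITION & SPEC =====
def Spec_filtered_argv_for_worker_py (argv : List String) (out : List String) : Prop := out = filtered_argv_for_worker_py_alt argv
instance (argv : List String) (out : List String) : Decidable (Spec_filtered_argv_for_worker_py argv out) := by unfold Spec_filtered_argv_for_worker_py; infer_instance

-- ===== CLAIM (what is proved, stated in full; the proofs are below) =====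
def Claim_equal_filtered_argv_for_worker_py : Prop := ∀ (argv : List String), Dom_filtered_argv_for_worker_py argv → Spec_filtered_argv_for_worker_py argv (filtered_argv_for_worker_py argv)

-- ===== LEMMAS AND PROOFS =====

-- proof-only bridge: B's loops re-expressed as structural recursion on the suffix argv.drop i
def pvSkipVals (l : List String) : List String :=
  match l with
  | [] => []
  | t :: r => if !(PySem.Str.startswith t "-") then pvSkipVals r else t :: r

theorem pvSkipVals_length_le (l : List String) : (pvSkipVals l).length ≤ l.length := by
  induction l with
  | nil => simp [pvSkipVals]
  | cons t r ih =>
    simp only [pvSkipVals]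
    split
    · exact Nat.le_trans ih (Nat.le_succ _)
    · exact Nat.le_refl _

def pvGoL (l : List String) : List String :=
  match l with
  | [] => []
  | tok :: rest =>
    if tok = "--gpu_ids" then pvGoL (pvSkipVals rest)
    else if PySem.Str.startswith tok "--gpu_ids=" then pvGoL rest
    else if tok = "--master_port" then pvGoL (rest.drop 1)
    else if PySem.Str.startswith tok "--master_port=" then pvGoL rest
    else tok :: pvGoL rest
termination_by l.length
decreasing_by
  · exact Nat.lt_succ_of_le (pvSkipVals_length_le rest)
  · exact Nat.lt_succ_of_le (Nat.le_refl _)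
  · exact Nat.lt_succ_of_le (by simp)
  · exact Nat.lt_succ_of_le (Nat.le_refl _)
  · exact Nat.lt_succ_of_le (Nat.le_refl _)

theorem pvGoA_cons_ff (tok : String) (rest f : List String) :
    pvGoA (tok :: rest) f false false =
      (if tok = "--gpu_ids" then pvGoA rest f true false
       else if PySem.Str.startswith tok "--gpu_ids=" then pvGoA rest f false false
       else if tok = "--master_port" then pvGoA rest f false true
       else if PySem.Str.startswith tok "--master_port=" then pvGoA rest f false false
       else pvGoA rest (f ++ [tok]) false false) := rfl

theorem pvGoA_cons_tf (tok : String) (rest f : List String) :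
    pvGoA (tok :: rest) f true false =
      (if PySem.Str.startswith tok "-" then pvGoA (tok :: rest) f false false
       else pvGoA rest f true false) := by
  cases hb : PySem.Str.startswith tok "-" with
  | false => simp only [pvGoA, hb]; rfl
  | true => simp only [pvGoA, hb]; rfl

theorem pvGoA_cons_ft (tok : String) (rest f : List String) :
    pvGoA (tok :: rest) f false true = pvGoA rest f false false := rfl

theorem pvGoL_cons (tok : String) (rest : List String) :
    pvGoL (tok :: rest) =
      (if tok = "--gpu_ids" then pvGoL (pvSkipVals rest)
       else if PySem.Str.startswith tok "--gpu_ids=" then pvGoL rest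
       else if tok = "--master_port" then pvGoL (rest.drop 1)
       else if PySem.Str.startswith tok "--master_port=" then pvGoL rest
       else tok :: pvGoL rest) := by
  rw [pvGoL]

-- in gpu-skip mode, A drops tokens exactly like pvSkipVals, then resumes on the stopping token
theorem pvGoA_gpu (l f : List String) :
    pvGoA l f true false = pvGoA (pvSkipVals l) f false false := by
  induction l generalizing f with
  | nil => rfl
  | cons t r ih =>
    rw [pvGoA_cons_tf]
    cases hb : PySem.Str.startswith t "-" with
    | false => simp only [pvSkipVals, hb, Bool.not_false, if_pos]; simpa using ih f
    | true => simp only [pvSkipVals, hb, Bool.not_true]; rfl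

-- in skip-next mode, A drops one token and resumes with clear flags
theorem pvGoA_next (l f : List String) :
    pvGoA l f false true = pvGoA (l.drop 1) f false false := by
  cases l with
  | nil => rfl
  | cons t r => rw [pvGoA_cons_ft]; rfl

theorem pvGoA_eq_goL (n : Nat) : ∀ (l f : List String), l.length ≤ n →
    pvGoA l f false false = f ++ pvGoL l := by
  induction n with
  | zero =>
    intro l f h
    have : l = [] := List.eq_nil_of_length_eq_zero (Nat.le_zero.mp h)
    subst this; simp [pvGoL]; rfl
  | succ n ih =>
    intro l f h
    cases l with
    | nil => simp [pvGoL]; rfl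
    | cons tok rest =>
      have hr : rest.length ≤ n := Nat.le_of_succ_le_succ h
      rw [pvGoA_cons_ff, pvGoL_cons]
      by_cases h1 : tok = "--gpu_ids"
      · rw [if_pos h1, if_pos h1, pvGoA_gpu]
        exact ih _ f (Nat.le_trans (pvSkipVals_length_le rest) hr)
      · rw [if_neg h1, if_neg h1]
        by_cases h2 : PySem.Str.startswith tok "--gpu_ids=" = true
        · rw [if_pos h2, if_pos h2]; exact ih rest f hr
        · rw [if_neg h2, if_neg h2]
          by_cases h3 : tok = "--master_port"
          · rw [if_pos h3, if_pos h3, pvGoA_next]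
            exact ih _ f (Nat.le_trans (by simp) hr)
          · rw [if_neg h3, if_neg h3]
            by_cases h4 : PySem.Str.startswith tok "--master_port=" = true
            · rw [if_pos h4, if_pos h4]; exact ih rest f hr
            · rw [if_neg h4, if_neg h4, ih rest (f ++ [tok]) hr]
              simp

theorem pvDrop_cons (argv : List String) (i : Nat) (h : i < argv.length) :
    argv.drop i = argv.getD i "" :: argv.drop (i + 1) := by
  rw [List.getD_eq_getElem argv _ h]
  exact List.drop_eq_getElem_cons h

theorem pvSkipIdx_drop (argv : List String) : ∀ (i : Nat),
    argv.drop (pvSkipIdx argv i) = pvSkipVals (argv.drop i) := by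
  intro i
  rw [pvSkipIdx]
  split
  · rename_i hlt
    rw [pvDrop_cons argv i hlt]
    cases hb : PySem.Str.startswith (argv.getD i "") "-" with
    | false =>
      simp only [pvSkipVals, hb, Bool.not_false, if_pos]
      simpa [hb] using pvSkipIdx_drop argv (i + 1)
    | true =>
      simp only [pvSkipVals]
      simp at hb
      simpa [hb] using pvDrop_cons argv i hlt
  · rename_i hge
    have h1 : argv.drop i = [] := List.drop_of_length_le (Nat.le_of_not_lt hge)
    rw [h1]
    rfl
termination_by i => argv.length - i
decreasing_by omega

theorem pvGoB_eq_goL (argv : List String) : ∀ (i : Nat) (out : List String),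
    pvGoB argv out i = out ++ pvGoL (argv.drop i) := by
  intro i out
  rw [pvGoB]
  split
  · rename_i hlt
    have hd := pvDrop_cons argv i hlt
    rw [hd, pvGoL_cons]
    by_cases h1 : argv.getD i "" = "--gpu_ids"
    · rw [if_pos h1, if_pos h1, pvGoB_eq_goL argv (pvSkipIdx argv (i + 1)) out,
          pvSkipIdx_drop]
    · rw [if_neg h1, if_neg h1]
      by_cases h2 : PySem.Str.startswith (argv.getD i "") "--gpu_ids=" = true
      · rw [if_pos h2, if_pos h2, pvGoB_eq_goL argv (i + 1) out]
      · rw [if_neg h2, if_neg h2]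
        by_cases h3 : argv.getD i "" = "--master_port"
        · rw [if_pos h3, if_pos h3, pvGoB_eq_goL argv (i + 2) out]
          have : argv.drop (i + 2) = (argv.drop (i + 1)).drop 1 := by
            rw [List.drop_drop]
          rw [this]
        · rw [if_neg h3, if_neg h3]
          by_cases h4 : PySem.Str.startswith (argv.getD i "") "--master_port=" = true
          · rw [if_pos h4, if_pos h4, pvGoB_eq_goL argv (i + 1) out]
          · rw [if_neg h4, if_neg h4, pvGoB_eq_goL argv (i + 1) (out ++ [argv.getD i ""])]
            simp
  · rename_i hge
    rw [List.drop_of_length_le (Nat.le_of_not_lt hge), pvGoL]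
    simp
termination_by i => argv.length - i
decreasing_by
  · have := pvSkipIdx_ge argv (i + 1); omega
  · omega
  · omega
  · omega
  · omega

-- ===== VERDICT (by name: the statement is the Claim_ definition above) =====
theorem filtered_argv_for_worker_py_spec : Claim_equal_filtered_argv_for_worker_py := by
  intro argv _
  unfold Spec_filtered_argv_for_worker_py filtered_argv_for_worker_py filtered_argv_for_worker_py_alt
  rw [pvGoB_eq_goL argv 0 []]
  simpa using pvGoA_eq_goL argv.length argv [] (Nat.le_refl _)
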